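-- pv_equiv track=rewrite | github.com/Jordan231111/CodeForce-Solutions | riffle_shuffle_hard.py | feasible_k_range
-- ===== SOURCE A (Python) =====
-- def feasible_k_range(n, p):
--     L = 1
--     U = n-1
--     max_so_far = 0
--     st = []  # increasing stack of values
--     for v in p:
--         if v == -1:
--             continue
--         if v < max_so_far:
--             if v > L:
--                 L = v
--         if not st:
--             st.append(v)
--         else:
--             # pop all greater than v
--             while st and st[-1] > v:
--                 x = st.pop()
--                 u = x - 1
--                 if u < U:
--                     U = u
--             if not st or st[-1] < v:
--                 st.append(v)
--         if v > max_so_far: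
--             max_so_far = v
--     if L > U:
--         return None
--     if U < 1:
--         return None
--     if L < 1:
--         L = 1
--     if U > n-1:
--         U = n-1
--     if L > U:
--         return None
--     return (L, U)
-- ===== SOURCE B (Python) =====
-- def feasible_k_range(n, p):
--     # Two linear scans instead of a monotonic stack: a suffix-minimum pass over the
--     # non-(-1) values, then one forward pass with a running prefix maximum.
--     vals = [v for v in p if v != -1]
--     suf_after = []          # suf_after[i] = min of vals[i+1:], or None
--     cur = None
--     for v in reversed(vals):
--         suf_after.append(cur)
--         cur = v if cur is None or v < cur else cur
--     suf_after.reverse()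
--     L = 1
--     U = n - 1
--     pmax = 0
--     for v, s in zip(vals, suf_after):
--         if v < pmax and v > L:
--             L = v
--         if s is not None and s < v:
--             if v - 1 < U:
--                 U = v - 1
--         if v > pmax:
--             pmax = v
--     if L > U:
--         return None
--     if U < 1:
--         return None
--     if L < 1:
--         L = 1
--     if U > n - 1:
--         U = n - 1
--     if L > U:
--         return None
--     return (L, U)
-- ===== Notes on version B (the rewrite author's own statement) =====
-- stated objective: alternative
-- what changed: Replaces the monotonic stack (amortized pop bookkeeping) with a suffix-minimum precomputation plus a single forward prefix-max pass; an element contributes v-1 to U exactly when some later non-(-1) value is strictly smaller.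
import Mathlib
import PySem

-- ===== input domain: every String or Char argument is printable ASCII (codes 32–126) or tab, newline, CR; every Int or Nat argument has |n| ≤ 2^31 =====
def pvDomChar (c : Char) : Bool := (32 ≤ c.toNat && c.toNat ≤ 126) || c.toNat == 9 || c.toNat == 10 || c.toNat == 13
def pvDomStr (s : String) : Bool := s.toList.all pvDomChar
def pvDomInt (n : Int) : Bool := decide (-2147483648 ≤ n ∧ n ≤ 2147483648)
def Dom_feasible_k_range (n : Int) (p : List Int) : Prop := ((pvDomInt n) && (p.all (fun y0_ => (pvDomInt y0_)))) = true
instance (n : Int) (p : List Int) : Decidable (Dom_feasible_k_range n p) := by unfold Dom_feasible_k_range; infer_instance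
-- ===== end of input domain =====

-- B replaces A's monotonic stack with a suffix-minimum pass plus one forward prefix-max pass
-- (alternative structure, same asymptotic cost); return values proved identical on all inputs.


-- ===== PORT A =====
-- the inner 'while st and st[-1] > v' pop loop (stack head = Python st[-1])
def popLoop (v : Int) : List Int → Int → List Int × Int
  | [], U => ([], U)
  | x :: st, U =>
    if x > v then popLoop v st (if x - 1 < U then x - 1 else U)
    else (x :: st, U)

-- one iteration of A's 'for v in p' loop on state (L, U, max_so_far, st)
def stepA (s : Int × Int × Int × List Int) (v : Int) : Int × Int × Int × List Int :=
  if v = -1 then s else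
  let L := s.1; let U := s.2.1; let pmax := s.2.2.1; let st := s.2.2.2
  let L1 := if v < pmax then (if v > L then v else L) else L
  let sU :=
    match st with
    | [] => (v :: st, U)
    | _ :: _ =>
      match popLoop v st U with
      | (st2, U2) =>
        match st2 with
        | [] => (v :: st2, U2)
        | x :: _ => if x < v then (v :: st2, U2) else (st2, U2)
  let pmax1 := if v > pmax then v else pmax
  (L1, sU.2, pmax1, sU.1)

def feasible_k_range (n : Int) (p : List Int) : Option (Int × Int) :=
  let s := p.foldl stepA (1, n - 1, 0, [])
  let L := s.1; let U := s.2.1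
  if L > U then none
  else if U < 1 then none
  else
    let L2 := if L < 1 then 1 else L
    let U2 := if U > n - 1 then n - 1 else U
    if L2 > U2 then none else some (L2, U2)

-- ===== PORT B =====
-- backward pass of Source B: prepend the current suffix minimum, then fold it in
def sufStep (s : List (Option Int) × Option Int) (v : Int) : List (Option Int) × Option Int :=
  (s.2 :: s.1, some (match s.2 with | none => v | some c => if v < c then v else c))

-- suf_after[i] = min of vals[i+1:], or none
def sufAfter (vals : List Int) : List (Option Int) :=
  (vals.reverse.foldl sufStep ([], none)).1

-- one iteration of Source B's forward loop on state (L, U, pmax)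
def stepB (s : Int × Int × Int) (vm : Int × Option Int) : Int × Int × Int :=
  let L := s.1; let U := s.2.1; let pmax := s.2.2
  let v := vm.1
  let L1 := if v < pmax ∧ v > L then v else L
  let U1 :=
    match vm.2 with
    | none => U
    | some m => if m < v then (if v - 1 < U then v - 1 else U) else U
  let pmax1 := if v > pmax then v else pmax
  (L1, U1, pmax1)

def feasible_k_range_alt (n : Int) (p : List Int) : Option (Int × Int) :=
  let vals := p.filter (fun v => v != -1)
  let s := (vals.zip (sufAfter vals)).foldl stepB (1, n - 1, 0)
  let L := s.1; let U := s.2.1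
  if L > U then none
  else if U < 1 then none
  else
    let L2 := if L < 1 then 1 else L
    let U2 := if U > n - 1 then n - 1 else U
    if L2 > U2 then none else some (L2, U2)

-- ===== PRECONDITION & SPEC =====
def Spec_feasible_k_range (n : Int) (p : List Int) (out : Option (Int × Int)) : Prop := out = feasible_k_range_alt n p
instance (n : Int) (p : List Int) (out : Option (Int × Int)) : Decidable (Spec_feasible_k_range n p out) := by unfold Spec_feasible_k_range; infer_instance

-- ===== CLAIM (what is proved, stated in full; the proofs are below) =====
def Claim_equal_feasible_k_range : Prop := ∀ (n : Int) (p : List Int), Dom_feasible_k_range n p → Spec_feasible_k_range n p (feasible_k_range n p)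

-- ===== LEMMAS AND PROOFS =====

-- proof-side model of B's U evolution: v lowers U to v-1 iff some later value is smaller
def uB : List Int → Int → Int
  | [], U => U
  | v :: rest, U =>
    uB rest (if rest.any (fun w => w < v) then (if v - 1 < U then v - 1 else U) else U)

-- pending penalty of a stack element x against the remaining input vals
def penStep (vals : List Int) (U x : Int) : Int :=
  if vals.any (fun w => w < x) then (if x - 1 < U then x - 1 else U) else U

-- total pending penalty of a stack against the remaining input
def pen : List Int → List Int → Int → Int
  | [], _, U => U
  | x :: st, vals, U => pen st vals (penStep vals U x)

-- proof-side model of lpFold: the L/pmax components, shared by both programs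
def lpFold : List Int → Int × Int → Int × Int
  | [], s => s
  | v :: rest, s =>
    lpFold rest (if v < s.2 then (if v > s.1 then v else s.1) else s.1,
                 if v > s.2 then v else s.2)

-- proof-side suffix minimum
def smin : List Int → Option Int
  | [] => none
  | v :: rest => some (match smin rest with | none => v | some c => if v < c then v else c)

lemma sufFold_eq (vals : List Int) :
    vals.reverse.foldl sufStep ([], none) = (sufAfter vals, smin vals) := by
  induction vals with
  | nil => rfl
  | cons v rest ih =>
    have h : (v :: rest).reverse.foldl sufStep ([], none)
        = sufStep (rest.reverse.foldl sufStep ([], none)) v := by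
      simp [List.reverse_cons, List.foldl_append]
    rw [show sufAfter (v :: rest) = ((v :: rest).reverse.foldl sufStep ([], none)).1 from rfl,
        h, ih]
    rfl

lemma sufAfter_cons (v : Int) (rest : List Int) :
    sufAfter (v :: rest) = smin rest :: sufAfter rest := by
  have := sufFold_eq (v :: rest)
  have h : (v :: rest).reverse.foldl sufStep ([], none)
      = sufStep (rest.reverse.foldl sufStep ([], none)) v := by
    simp [List.reverse_cons, List.foldl_append]
  rw [h, sufFold_eq rest] at this
  have := congrArg Prod.fst this
  simpa [sufStep] using this.symm

lemma smin_lt (rest : List Int) (v : Int) :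
    (match smin rest with | none => false | some m => decide (m < v))
      = rest.any (fun w => decide (w < v)) := by
  induction rest with
  | nil => rfl
  | cons w tl ih =>
    cases tl with
    | nil => simp [smin]
    | cons y tl' =>
      obtain ⟨c, hc⟩ : ∃ c, smin (y :: tl') = some c := ⟨_, rfl⟩
      rw [hc] at ih
      have h : smin (w :: y :: tl')
          = some (match smin (y :: tl') with | none => w | some c => if w < c then w else c) := rfl
      rw [hc] at h
      rw [h, List.any_cons, ← ih]
      by_cases h1 : w < c <;> by_cases h2 : w < v <;> by_cases h3 : c < v <;>
        simp [h1, h2, h3] <;> omega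

-- B's fold equals the (lpFold, uB) decomposition
lemma foldB_eq (vals : List Int) : ∀ (L U pmax : Int),
    (vals.zip (sufAfter vals)).foldl stepB (L, U, pmax)
      = ((lpFold vals (L, pmax)).1, uB vals U, (lpFold vals (L, pmax)).2) := by
  induction vals with
  | nil => intro L U pmax; rfl
  | cons v rest ih =>
    intro L U pmax
    rw [sufAfter_cons]
    simp only [List.zip_cons_cons, List.foldl_cons]
    rw [ih]
    have hsl := smin_lt rest v
    have hU : (match smin rest with
        | none => U
        | some m => if m < v then (if v - 1 < U then v - 1 else U) else U)
        = (if rest.any (fun w => w < v) then (if v - 1 < U then v - 1 else U) else U) := by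
      cases h : smin rest with
      | none =>
        rw [h] at hsl
        have h2 : rest.any (fun w => decide (w < v)) = false := hsl.symm
        simp [h2]
      | some m =>
        rw [h] at hsl
        have h2 : rest.any (fun w => decide (w < v)) = decide (m < v) := hsl.symm
        by_cases hm : m < v <;> simp [h2, hm]
    have hL : (if v < pmax ∧ v > L then v else L)
        = (if v < pmax then (if v > L then v else L) else L) := by
      split_ifs <;> omega
    simp only [stepB, uB, lpFold, hU, hL]

lemma penStep_min (vals : List Int) (a b x : Int) :
    penStep vals (if b < a then b else a) x
      = (if b < penStep vals a x then b else penStep vals a x) := by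
  unfold penStep; split_ifs <;> omega

lemma pen_min (st : List Int) : ∀ (vals : List Int) (a b : Int),
    pen st vals (if b < a then b else a)
      = (if b < pen st vals a then b else pen st vals a) := by
  induction st with
  | nil => intros; rfl
  | cons x st ih =>
    intro vals a b
    simp only [pen]
    rw [penStep_min, ih]

lemma pen_drop (v : Int) (rest : List Int) : ∀ (st : List Int) (U : Int),
    (∀ x ∈ st, x ≤ v) → pen st (v :: rest) U = pen st rest U := by
  intro st
  induction st with
  | nil => intros; rfl
  | cons x st ih =>
    intro U hx
    have hxv : x ≤ v := hx x (by simp)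
    have : penStep (v :: rest) U x = penStep rest U x := by
      unfold penStep
      simp [List.any_cons, show ¬ v < x by omega]
    simp only [pen, this]
    exact ih _ (fun y hy => hx y (by simp [hy]))

lemma pen_nil : ∀ (st : List Int) (U : Int), pen st [] U = U := by
  intro st
  induction st with
  | nil => intro U; rfl
  | cons x st ih => intro U; simp [pen, penStep, ih]

lemma popLoop_main (v : Int) : ∀ (st : List Int) (U : Int), st.Pairwise (· > ·) →
    (popLoop v st U).1.Pairwise (· > ·) ∧
    (∀ x ∈ (popLoop v st U).1, x ≤ v) ∧
    (∀ (rest : List Int), pen st (v :: rest) U = pen (popLoop v st U).1 rest (popLoop v st U).2) := by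
  intro st
  induction st with
  | nil => intro U _; refine ⟨by simp [popLoop], by simp [popLoop], ?_⟩; intro rest; rfl
  | cons x st ih =>
    intro U hpw
    rw [List.pairwise_cons] at hpw
    by_cases hx : x > v
    · have hrec := ih (if x - 1 < U then x - 1 else U) hpw.2
      refine ⟨?_, ?_, ?_⟩
      · simpa [popLoop, hx] using hrec.1
      · simpa [popLoop, hx] using hrec.2.1
      · intro rest
        have hstep : penStep (v :: rest) U x = (if x - 1 < U then x - 1 else U) := by
          unfold penStep
          simp [List.any_cons, show v < x from hx]
        simp only [popLoop, hx, if_pos, pen, hstep]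
        exact hrec.2.2 rest
    · refine ⟨?_, ?_, ?_⟩
      · simpa [popLoop, hx] using List.pairwise_cons.mpr hpw
      · simp only [popLoop, if_neg hx]
        intro y hy
        rcases List.mem_cons.mp hy with h | h
        · omega
        · have := hpw.1 y h; omega
      · intro rest
        simp only [popLoop, if_neg hx]
        apply pen_drop
        intro y hy
        rcases List.mem_cons.mp hy with h | h
        · omega
        · have := hpw.1 y h; omega

lemma foldA_filter (p : List Int) : ∀ (s : Int × Int × Int × List Int),
    p.foldl stepA s = (p.filter (fun v => v != -1)).foldl stepA s := by
  induction p with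
  | nil => intro s; rfl
  | cons v rest ih =>
    intro s
    by_cases hv : v = -1
    · simp [hv, stepA, ih]
    · simp [hv, List.foldl_cons, ih]

-- A's fold equals the same (lpFold, uB∘pen) decomposition
lemma foldA_eq (vals : List Int) : ∀ (L U pmax : Int) (st : List Int),
    (∀ v ∈ vals, v ≠ -1) → st.Pairwise (· > ·) →
    (vals.foldl stepA (L, U, pmax, st)).1 = (lpFold vals (L, pmax)).1 ∧
    (vals.foldl stepA (L, U, pmax, st)).2.1 = uB vals (pen st vals U) ∧
    (vals.foldl stepA (L, U, pmax, st)).2.2.1 = (lpFold vals (L, pmax)).2 := by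
  induction vals with
  | nil => intro L U pmax st _ _; exact ⟨rfl, (pen_nil st U).symm, rfl⟩
  | cons v rest ih =>
    intro L U pmax st hne hpw
    have hv : v ≠ -1 := hne v (by simp)
    have hne' : ∀ w ∈ rest, w ≠ -1 := fun w hw => hne w (by simp [hw])
    cases st with
    | nil =>
      have hstep : stepA (L, U, pmax, ([] : List Int)) v
          = (if v < pmax then (if v > L then v else L) else L, U,
             if v > pmax then v else pmax, [v]) := by
        simp [stepA, hv]
      rw [List.foldl_cons, hstep]
      have := ih (if v < pmax then (if v > L then v else L) else L) U (if v > pmax then v else pmax) [v] hne' (by simp)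
      refine ⟨?_, ?_, ?_⟩
      · rw [this.1]; rfl
      · rw [this.2.1]
        have : pen ([] : List Int) (v :: rest) U = U := rfl
        rw [this]
        show uB rest (pen [v] rest U) = uB (v :: rest) U
        simp [pen, penStep, uB]
      · rw [this.2.2]; rfl
    | cons x st' =>
      obtain ⟨hpw2, hle2, hpen2⟩ := popLoop_main v (x :: st') U hpw
      set pl := popLoop v (x :: st') U with hpl
      have hpen : pen (x :: st') (v :: rest) U = pen pl.1 rest pl.2 := hpen2 rest
      -- the new stack/U after stepA
      cases hst2 : pl.1 with
      | nil =>
        -- pushed onto empty stack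
        have hstep : stepA (L, U, pmax, x :: st') v
            = (if v < pmax then (if v > L then v else L) else L, pl.2,
               if v > pmax then v else pmax, [v]) := by
          simp only [stepA, if_neg hv]
          simp [← hpl, hst2]
        rw [List.foldl_cons, hstep]
        have := ih (if v < pmax then (if v > L then v else L) else L) pl.2 (if v > pmax then v else pmax) [v] hne' (by simp)
        refine ⟨by rw [this.1]; rfl, ?_, by rw [this.2.2]; rfl⟩
        rw [this.2.1]
        show uB rest (pen [v] rest pl.2) = uB (v :: rest) (pen (x :: st') (v :: rest) U)
        rw [hpen, hst2]
        simp [pen, penStep, uB]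
      | cons x2 tl =>
        have hx2v : x2 ≤ v := hle2 x2 (by rw [hst2]; simp)
        by_cases hlt : x2 < v
        · -- push on top
          have hstep : stepA (L, U, pmax, x :: st') v
              = (if v < pmax then (if v > L then v else L) else L, pl.2,
                 if v > pmax then v else pmax, v :: x2 :: tl) := by
            simp only [stepA, if_neg hv]
            simp [← hpl, hst2, hlt]
          rw [List.foldl_cons, hstep]
          have hpwnew : (v :: x2 :: tl).Pairwise (· > ·) := by
            rw [List.pairwise_cons]
            constructor
            · intro y hy
              have hy' : y ∈ pl.1 := by rw [hst2]; exact hy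
              have := hle2 y hy'
              rcases List.mem_cons.mp hy with h | h
              · omega
              · have hpwtl := hst2 ▸ hpw2
                rw [List.pairwise_cons] at hpwtl
                have := hpwtl.1 y h; omega
            · exact hst2 ▸ hpw2
          have := ih (if v < pmax then (if v > L then v else L) else L) pl.2 (if v > pmax then v else pmax) (v :: x2 :: tl) hne' hpwnew
          refine ⟨by rw [this.1]; rfl, ?_, by rw [this.2.2]; rfl⟩
          rw [this.2.1, hpen, hst2]
          show uB rest (pen (v :: x2 :: tl) rest pl.2)
              = uB (v :: rest) (pen (x2 :: tl) rest pl.2)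
          simp only [uB, pen]
          congr 1
          by_cases h1 : rest.any (fun w => decide (w < v)) = true
          · rw [if_pos h1]
            have hv1 : penStep rest pl.2 v = (if v - 1 < pl.2 then v - 1 else pl.2) := by
              unfold penStep; rw [if_pos h1]
            rw [hv1, penStep_min, pen_min]
          · rw [if_neg h1]
            have hv1 : penStep rest pl.2 v = pl.2 := by
              unfold penStep; rw [if_neg h1]
            rw [hv1]
        · -- x2 = v : no push
          have hx2 : x2 = v := by omega
          have hstep : stepA (L, U, pmax, x :: st') v
              = (if v < pmax then (if v > L then v else L) else L, pl.2,
                 if v > pmax then v else pmax, x2 :: tl) := by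
            simp only [stepA, if_neg hv]
            simp [← hpl, hst2, hlt]
          rw [List.foldl_cons, hstep]
          have := ih (if v < pmax then (if v > L then v else L) else L) pl.2 (if v > pmax then v else pmax) (x2 :: tl) hne' (hst2 ▸ hpw2)
          refine ⟨by rw [this.1]; rfl, ?_, by rw [this.2.2]; rfl⟩
          rw [this.2.1, hpen, hst2]
          show uB rest (pen (x2 :: tl) rest pl.2)
              = uB (v :: rest) (pen (x2 :: tl) rest pl.2)
          simp only [uB]
          congr 1
          subst hx2
          by_cases h1 : rest.any (fun w => decide (w < x2)) = true
          · rw [if_pos h1]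
            have hv1 : penStep rest pl.2 x2 = (if x2 - 1 < pl.2 then x2 - 1 else pl.2) := by
              unfold penStep; rw [if_pos h1]
            have hP : pen (x2 :: tl) rest pl.2
                = (if x2 - 1 < pen tl rest pl.2 then x2 - 1 else pen tl rest pl.2) := by
              show pen tl rest (penStep rest pl.2 x2) = _
              rw [hv1, pen_min]
            rw [hP]
            split_ifs <;> omega
          · rw [if_neg h1]

-- ===== VERDICT (by name: the statement is the Claim_ definition above) =====
theorem feasible_k_range_spec : Claim_equal_feasible_k_range := by
  intro n p _
  show feasible_k_range n p = feasible_k_range_alt n p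
  unfold feasible_k_range feasible_k_range_alt
  set vals := p.filter (fun v => v != -1) with hvals
  have hne : ∀ v ∈ vals, v ≠ -1 := by
    intro v hv
    rw [hvals, List.mem_filter] at hv
    simpa using hv.2
  have hA := foldA_eq vals 1 (n - 1) 0 [] hne (by simp)
  have hB := foldB_eq vals 1 (n - 1) 0
  rw [foldA_filter p (1, n - 1, 0, [])]
  rw [← hvals] at *
  have hpen : pen ([] : List Int) vals (n - 1) = n - 1 := rfl
  rw [hpen] at hA
  simp only [hB, hA.1, hA.2.1]
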